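-- pv_equiv track=rewrite | github.com/viait-team/color_image_svgx | color_image_svgx.py | get_nonpalette_color
-- ===== SOURCE A (Python) =====
-- def get_nonpalette_color(palette, start_black=True, additional=None):
--     """return a color hex string not listed in palette"""
--     palette_ = set(p.lower() for p in palette)
--     if additional:
--         palette_.update(a.lower() for a in additional)
--
--     color_range = range(int('ffffff', 16) + 1) if start_black else range(int('ffffff', 16), -1, -1)
--
--     for i in color_range:
--         color = f"#{i:06x}"
--         if color not in palette_:
--             return color
--     raise Exception("All colors exhausted, could not find a nonpalette color")
-- ===== SOURCE B (Python) =====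
-- def get_nonpalette_color(palette, start_black=True, additional=None):
--     """return a color hex string not listed in palette"""
--     hexdigits = set('0123456789abcdef')
--     blocked = set()
--     for s in list(palette) + list(additional or []):
--         t = s.lower()
--         if len(t) == 7 and t[0] == '#' and all(c in hexdigits for c in t[1:]):
--             blocked.add(int(t[1:], 16))
--     if start_black:
--         expected = 0
--         for v in sorted(blocked):
--             if v == expected:
--                 expected += 1
--             elif v > expected:
--                 break
--         if expected > 0xffffff:
--             raise Exception("All colors exhausted, could not find a nonpalette color")
--     else:
--         expected = 0xffffff
--         for v in sorted(blocked, reverse=True):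
--             if v == expected:
--                 expected -= 1
--             elif v < expected:
--                 break
--         if expected < 0:
--             raise Exception("All colors exhausted, could not find a nonpalette color")
--     return f"#{expected:06x}"
-- ===== Notes on version B (the rewrite author's own statement) =====
-- stated objective: alternative
-- what changed: Instead of scanning color integers 0..0xffffff and testing each '#xxxxxx' string against the palette set, B parses the well-formed '#'+6-hex-digit palette entries into integers once, sorts that set, and walks it with an expected counter to find the first gap (from 0 upward, or from 0xffffff downward).
import Mathlib
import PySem

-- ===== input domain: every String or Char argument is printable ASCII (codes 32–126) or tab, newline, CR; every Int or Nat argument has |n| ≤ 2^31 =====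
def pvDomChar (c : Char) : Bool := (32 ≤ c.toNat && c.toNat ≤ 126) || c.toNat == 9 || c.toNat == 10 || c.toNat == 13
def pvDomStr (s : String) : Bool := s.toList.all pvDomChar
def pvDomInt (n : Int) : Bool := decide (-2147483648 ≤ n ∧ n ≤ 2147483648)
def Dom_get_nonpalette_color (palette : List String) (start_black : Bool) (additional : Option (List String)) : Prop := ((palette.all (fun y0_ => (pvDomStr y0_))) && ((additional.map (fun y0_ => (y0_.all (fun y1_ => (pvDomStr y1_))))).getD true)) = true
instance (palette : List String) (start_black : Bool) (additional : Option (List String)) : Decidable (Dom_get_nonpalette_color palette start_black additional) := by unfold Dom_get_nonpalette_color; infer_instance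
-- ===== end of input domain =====

-- B replaces A's scan over the 2^24 candidate colors by parsing the palette itself (well-formed
-- '#xxxxxx' entries become integers), sorting the blocked integers and walking them with an
-- expected counter — an alternative algorithm over the palette instead of the color space.

-- ===== PORT A =====
-- hand-port of the f-string f"#{i:06x}": exact for every i ≤ 0xffffff (all values the loops use)
def pvHexDigit (n : Nat) : Char := if n < 10 then Char.ofNat (48 + n) else Char.ofNat (87 + n)
def pvHex6 (i : Nat) : String :=
  String.ofList ['#', pvHexDigit (i / 1048576 % 16), pvHexDigit (i / 65536 % 16),
    pvHexDigit (i / 4096 % 16), pvHexDigit (i / 256 % 16), pvHexDigit (i / 16 % 16),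
    pvHexDigit (i % 16)]

-- the ascending for-loop over range(0x1000000); fuel = remaining iterations;
-- fuel 0 = range exhausted, where Python raises Exception (excluded by Pre_)
def pvLoopAsc (s : PySem.Set String) (i fuel : Nat) : String :=
  match fuel with
  | 0 => ""
  | fuel' + 1 =>
    let color := pvHex6 i
    if PySem.Set.contains s color then pvLoopAsc s (i + 1) fuel' else color

-- the descending for-loop over range(0xffffff, -1, -1)
def pvLoopDesc (s : PySem.Set String) (i fuel : Nat) : String :=
  match fuel with
  | 0 => ""
  | fuel' + 1 =>
    let color := pvHex6 i
    if PySem.Set.contains s color then pvLoopDesc s (i - 1) fuel' else color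

def get_nonpalette_color (palette : List String) (start_black : Bool) (additional : Option (List String)) : String :=
  let palette_ : PySem.Set String := PySem.Set.ofList (palette.map PySem.Str.lower)
  let palette_ : PySem.Set String :=
    match additional with
    | some l => if l ≠ [] then PySem.Set.update palette_ (l.map PySem.Str.lower) else palette_
    | none => palette_
  if start_black then pvLoopAsc palette_ 0 16777216 else pvLoopDesc palette_ 16777215 16777216

-- ===== PORT B =====
def pvHexVal? (c : Char) : Option Nat :=
  if 48 ≤ c.toNat ∧ c.toNat ≤ 57 then some (c.toNat - 48)
  else if 97 ≤ c.toNat ∧ c.toNat ≤ 102 then some (c.toNat - 87)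
  else none

def pvParse6 : List Char → Option Nat
  | [c1, c2, c3, c4, c5, c6] => do
    let d1 ← pvHexVal? c1
    let d2 ← pvHexVal? c2
    let d3 ← pvHexVal? c3
    let d4 ← pvHexVal? c4
    let d5 ← pvHexVal? c5
    let d6 ← pvHexVal? c6
    pure (((((d1 * 16 + d2) * 16 + d3) * 16 + d4) * 16 + d5) * 16 + d6)
  | _ => none

-- B's len==7 / '#' / all-hex-digits test together with int(t[1:], 16), in one parser
def pvParseColor? (s : String) : Option Nat :=
  match s.toList with
  | c :: cs => if c = '#' then pvParse6 cs else none
  | [] => none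

def pvWalkUp : List Nat → Nat → Nat
  | [], e => e
  | v :: vs, e => if v = e then pvWalkUp vs (e + 1) else if e < v then e else pvWalkUp vs e

def pvWalkDown : List Nat → Int → Int
  | [], e => e
  | v :: vs, e => if (v : Int) = e then pvWalkDown vs (e - 1) else if (v : Int) < e then e else pvWalkDown vs e

def get_nonpalette_color_alt (palette : List String) (start_black : Bool) (additional : Option (List String)) : String :=
  let blocked : PySem.Set Nat :=
    PySem.Set.ofList ((palette ++ additional.getD []).filterMap (fun s => pvParseColor? (PySem.Str.lower s)))
  if start_black then
    let e := pvWalkUp (PySem.List.sorted blocked (fun x => x) false) 0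
    if e ≤ 16777215 then pvHex6 e else ""   -- "" = the raise branch, excluded by Pre_
  else
    let e := pvWalkDown (PySem.List.sorted blocked (fun x => x) true) 16777215
    if 0 ≤ e then pvHex6 e.toNat else ""    -- "" = the raise branch, excluded by Pre_

-- ===== PRECONDITION & SPEC =====
-- A raises "All colors exhausted" exactly when all 2^24 colors are blocked, i.e. when palette and
-- additional together contain 2^24 distinct (after lowercasing) well-formed '#xxxxxx' entries;
-- Pre_ excludes exactly that case (unreachable for inputs of sane size).
def Pre_get_nonpalette_color (palette : List String) (start_black : Bool) (additional : Option (List String)) : Prop :=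
  (PySem.Set.ofList ((palette ++ additional.getD []).filterMap (fun s => pvParseColor? (PySem.Str.lower s)))).length < 16777216
instance (palette : List String) (start_black : Bool) (additional : Option (List String)) : Decidable (Pre_get_nonpalette_color palette start_black additional) := by unfold Pre_get_nonpalette_color; infer_instance
def pvWitness_get_nonpalette_color : List String × Bool × Option (List String) := (["#000000", "#00000A"], true, some ["#000001"])

def Spec_get_nonpalette_color (palette : List String) (start_black : Bool) (additional : Option (List String)) (out : String) : Prop := out = get_nonpalette_color_alt palette start_black additional
instance (palette : List String) (start_black : Bool) (additional : Option (List String)) (out : String) : Decidable (Spec_get_nonpalette_color palette start_black additional out) := by unfold Spec_get_nonpalette_color; infer_instance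

-- ===== CLAIM (what is proved, stated in full; the proofs are below) =====
def Claim_equal_get_nonpalette_color : Prop := ∀ (palette : List String) (start_black : Bool) (additional : Option (List String)), Dom_get_nonpalette_color palette start_black additional → Pre_get_nonpalette_color palette start_black additional → Spec_get_nonpalette_color palette start_black additional (get_nonpalette_color palette start_black additional)

-- ===== LEMMAS AND PROOFS =====

-- the lowered palette entries, as A's set sees them
def pvLowered (palette : List String) (additional : Option (List String)) : List String :=
  (palette ++ additional.getD []).map PySem.Str.lower

-- the blocked color numbers, as B computes them
def pvVals (palette : List String) (additional : Option (List String)) : List Nat :=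
  (palette ++ additional.getD []).filterMap (fun s => pvParseColor? (PySem.Str.lower s))

-- A's set, named for the proofs (definitionally the set get_nonpalette_color builds)
def pvSetA (palette : List String) (additional : Option (List String)) : PySem.Set String :=
  match additional with
  | some l => if l ≠ [] then PySem.Set.update (PySem.Set.ofList (palette.map PySem.Str.lower)) (l.map PySem.Str.lower)
              else PySem.Set.ofList (palette.map PySem.Str.lower)
  | none => PySem.Set.ofList (palette.map PySem.Str.lower)

lemma pvHexVal_hexDigit (d : Nat) (h : d < 16) : pvHexVal? (pvHexDigit d) = some d := by
  interval_cases d <;> decide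

lemma pvHexVal_inv (c : Char) (d : Nat) (h : pvHexVal? c = some d) :
    pvHexDigit d = c ∧ d < 16 := by
  unfold pvHexVal? at h
  split_ifs at h with h1 h2 <;> injection h with h <;> subst h <;>
    refine ⟨?_, by omega⟩ <;> unfold pvHexDigit
  · rw [if_pos (by omega)]
    have : 48 + (c.toNat - 48) = c.toNat := by omega
    rw [this, Char.ofNat_toNat]
  · rw [if_neg (by omega)]
    have : 87 + (c.toNat - 87) = c.toNat := by omega
    rw [this, Char.ofNat_toNat]

lemma pvParse_hex6 (i : Nat) (h : i < 16777216) : pvParseColor? (pvHex6 i) = some i := by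
  have m : ∀ a : Nat, a % 16 < 16 := fun a => Nat.mod_lt _ (by omega)
  simp only [pvParseColor?, pvHex6, String.toList_ofList]
  rw [if_true]
  simp only [pvParse6, pvHexVal_hexDigit _ (m _), Option.bind_eq_bind, Option.bind_some,
    pure, Option.some.injEq]
  omega

lemma pvParse_inv (t : String) (v : Nat) (h : pvParseColor? t = some v) :
    v < 16777216 ∧ t = pvHex6 v := by
  have ht : t = String.ofList t.toList := String.ofList_toList.symm
  unfold pvParseColor? at h
  rcases hcs : t.toList with _ | ⟨c, cs⟩ <;> rw [hcs] at h
  · simp at h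
  rw [ht, hcs]
  dsimp only at h
  split_ifs at h with hc
  subst hc
  rcases cs with _ | ⟨c1, _ | ⟨c2, _ | ⟨c3, _ | ⟨c4, _ | ⟨c5, _ | ⟨c6, _ | ⟨c7, rest⟩⟩⟩⟩⟩⟩⟩ <;>
    simp [pvParse6, Option.bind_eq_some_iff] at h
  obtain ⟨d1, h1, d2, h2, d3, h3, d4, h4, d5, h5, d6, h6, hv⟩ := h
  obtain ⟨e1, l1⟩ := pvHexVal_inv _ _ h1
  obtain ⟨e2, l2⟩ := pvHexVal_inv _ _ h2
  obtain ⟨e3, l3⟩ := pvHexVal_inv _ _ h3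
  obtain ⟨e4, l4⟩ := pvHexVal_inv _ _ h4
  obtain ⟨e5, l5⟩ := pvHexVal_inv _ _ h5
  obtain ⟨e6, l6⟩ := pvHexVal_inv _ _ h6
  have hb : v < 16777216 := by omega
  refine ⟨hb, ?_⟩
  have g1 : v / 1048576 % 16 = d1 := by omega
  have g2 : v / 65536 % 16 = d2 := by omega
  have g3 : v / 4096 % 16 = d3 := by omega
  have g4 : v / 256 % 16 = d4 := by omega
  have g5 : v / 16 % 16 = d5 := by omega
  have g6 : v % 16 = d6 := by omega
  simp only [pvHex6, g1, g2, g3, g4, g5, g6, e1, e2, e3, e4, e5, e6]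

lemma pvMem_vals (palette : List String) (additional : Option (List String)) (i : Nat)
    (hi : i < 16777216) :
    i ∈ pvVals palette additional ↔ pvHex6 i ∈ pvLowered palette additional := by
  unfold pvVals pvLowered
  rw [List.mem_filterMap]
  rw [List.mem_map]
  constructor
  · rintro ⟨s, hs, hp⟩
    exact ⟨s, hs, (pvParse_inv _ _ hp).2⟩
  · rintro ⟨s, hs, hp⟩
    exact ⟨s, hs, by rw [hp]; exact pvParse_hex6 i hi⟩

lemma pvContainsA (palette : List String) (additional : Option (List String)) (t : String) :
    PySem.Set.contains (pvSetA palette additional) t = true ↔ t ∈ pvLowered palette additional := by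
  cases additional with
  | none => simp [pvSetA, pvLowered, PySem.Set.contains, PySem.Set.mem_ofList]
  | some l =>
    by_cases hl : l = []
    · simp [pvSetA, hl, pvLowered, PySem.Set.contains, pysem]
    · simp [pvSetA, hl, pvLowered, PySem.Set.contains, pysem]
      constructor
      · rintro (h | ⟨a, ha, he⟩)
        · exact Or.inl h
        · exact Or.inr ⟨a, ha, he.symm⟩
      · rintro (h | ⟨a, ha, he⟩)
        · exact Or.inl h
        · exact Or.inr ⟨a, ha, he.symm⟩

lemma pvContainsA_false (palette : List String) (additional : Option (List String)) (t : String) :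
    PySem.Set.contains (pvSetA palette additional) t = false ↔ t ∉ pvLowered palette additional := by
  rw [← pvContainsA palette additional t]
  cases PySem.Set.contains (pvSetA palette additional) t <;> simp

lemma pvLoopAsc_spec (s : PySem.Set String) (fuel i N : Nat) (h1 : i ≤ N) (h2 : N < i + fuel)
    (h3 : PySem.Set.contains s (pvHex6 N) = false)
    (h4 : ∀ j, i ≤ j → j < N → PySem.Set.contains s (pvHex6 j) = true) :
    pvLoopAsc s i fuel = pvHex6 N := by
  induction fuel generalizing i with
  | zero => omega
  | succ fuel ih =>
    simp only [pvLoopAsc]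
    split_ifs with hc
    · have hne : i ≠ N := fun h => by rw [h, h3] at hc; exact Bool.noConfusion hc
      exact ih (i + 1) (by omega) (by omega) (fun j hj1 hj2 => h4 j (by omega) hj2)
    · have : ¬ i < N := fun hlt => by rw [h4 i le_rfl hlt] at hc; exact hc rfl
      have : i = N := by omega
      rw [this]

lemma pvLoopDesc_spec (s : PySem.Set String) (fuel i N : Nat) (h1 : N ≤ i) (h2 : i - N < fuel)
    (h3 : PySem.Set.contains s (pvHex6 N) = false)
    (h4 : ∀ j, N < j → j ≤ i → PySem.Set.contains s (pvHex6 j) = true) :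
    pvLoopDesc s i fuel = pvHex6 N := by
  induction fuel generalizing i with
  | zero => omega
  | succ fuel ih =>
    simp only [pvLoopDesc]
    split_ifs with hc
    · have hne : i ≠ N := fun h => by rw [h, h3] at hc; exact Bool.noConfusion hc
      exact ih (i - 1) (by omega) (by omega) (fun j hj1 hj2 => h4 j hj1 (by omega))
    · have : ¬ N < i := fun hlt => by rw [h4 i hlt le_rfl] at hc; exact hc rfl
      have : i = N := by omega
      rw [this]

lemma pvWalkUp_spec (l : List Nat) (e N : Nat) (hp : l.Pairwise (· < ·)) (h1 : e ≤ N)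
    (h2 : N ∉ l) (h3 : ∀ j, e ≤ j → j < N → j ∈ l) : pvWalkUp l e = N := by
  induction l generalizing e with
  | nil =>
    simp only [pvWalkUp]
    by_contra hne
    simpa using h3 e le_rfl (by omega)
  | cons v vs ih =>
    rw [List.pairwise_cons] at hp
    have hvs : N ∉ vs := fun h => h2 (List.mem_cons_of_mem _ h)
    simp only [pvWalkUp]
    split_ifs with hv hlt
    · subst hv
      have hvN : v ≠ N := fun h => h2 (h ▸ List.mem_cons_self ..)
      refine ih _ hp.2 (by omega) hvs (fun j hj1 hj2 => ?_)
      rcases List.mem_cons.mp (h3 j (by omega) hj2) with h | h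
      · omega
      · exact h
    · by_contra hne
      rcases List.mem_cons.mp (h3 e le_rfl (by omega)) with h | h
      · omega
      · exact absurd (hp.1 e h) (by omega)
    · refine ih _ hp.2 h1 hvs (fun j hj1 hj2 => ?_)
      rcases List.mem_cons.mp (h3 j hj1 hj2) with h | h
      · omega
      · exact h

lemma pvWalkDown_spec (l : List Nat) (e : Int) (N : Nat) (hp : l.Pairwise (fun a b => b < a))
    (h1 : (N : Int) ≤ e) (h2 : N ∉ l) (h3 : ∀ j : Nat, (j : Int) ≤ e → N < j → j ∈ l) :
    pvWalkDown l e = (N : Int) := by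
  induction l generalizing e with
  | nil =>
    simp only [pvWalkDown]
    by_contra hne
    simpa using h3 e.toNat (by omega) (by omega)
  | cons v vs ih =>
    rw [List.pairwise_cons] at hp
    have hvs : N ∉ vs := fun h => h2 (List.mem_cons_of_mem _ h)
    simp only [pvWalkDown]
    split_ifs with hv hlt
    · have hvN : v ≠ N := fun h => h2 (h ▸ List.mem_cons_self ..)
      refine ih _ hp.2 (by omega) hvs (fun j hj1 hj2 => ?_)
      rcases List.mem_cons.mp (h3 j (by omega) hj2) with h | h
      · omega
      · exact h
    · by_contra hne
      rcases List.mem_cons.mp (h3 e.toNat (by omega) (by omega)) with h | h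
      · omega
      · have := hp.1 _ h; omega
    · refine ih _ hp.2 h1 hvs (fun j hj1 hj2 => ?_)
      rcases List.mem_cons.mp (h3 j hj1 hj2) with h | h
      · omega
      · exact h

lemma pvExists_free (palette : List String) (additional : Option (List String))
    (hpre : (PySem.Set.ofList (pvVals palette additional)).length < 16777216) :
    ∃ j, j < 16777216 ∧ pvHex6 j ∉ pvLowered palette additional := by
  by_contra h
  push_neg at h
  have hsub : Finset.range 16777216 ⊆ (PySem.Set.ofList (pvVals palette additional)).toFinset := by
    intro j hj
    have hj' := Finset.mem_range.mp hj
    exact List.mem_toFinset.mpr ((PySem.Set.mem_ofList _ _).mpr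
      ((pvMem_vals palette additional j hj').mpr (h j hj')))
  have hcard := Finset.card_le_card hsub
  rw [Finset.card_range, List.toFinset_card_of_nodup (PySem.Set.nodup_ofList _)] at hcard
  omega

-- strict descending order of sorted(set(xs), reverse=True)
lemma pvSortedDesc_pairwise (xs : List Nat) :
    (PySem.List.sorted (PySem.Set.ofList xs) (fun x => x) true).Pairwise (fun a b => b < a) := by
  have h1 := PySem.List.sorted_pairwise_rev (PySem.Set.ofList xs) (fun x => x)
  have hnd : (PySem.List.sorted (PySem.Set.ofList xs) (fun x => x) true).Nodup :=
    ((PySem.List.sorted_perm (PySem.Set.ofList xs) (fun x => x) true).nodup_iff).mpr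
      (PySem.Set.nodup_ofList xs)
  exact (h1.and hnd).imp (fun h => lt_of_le_of_ne h.1 (Ne.symm h.2))

-- ===== VERDICT (by name: the statement is the Claim_ definition above) =====
theorem get_nonpalette_color_spec : Claim_equal_get_nonpalette_color := by
  intro palette start_black additional _hdom hpre
  unfold Spec_get_nonpalette_color
  have hpre' : (PySem.Set.ofList (pvVals palette additional)).length < 16777216 := hpre
  obtain ⟨j0, hj0, hf0⟩ := pvExists_free palette additional hpre'
  cases start_black with
  | true =>
    -- N = the least free color index
    have hex : ∃ j, j < 16777216 ∧ pvHex6 j ∉ pvLowered palette additional := ⟨j0, hj0, hf0⟩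
    set N := Nat.find hex with hNdef
    obtain ⟨hNlt, hNfree⟩ := Nat.find_spec hex
    have hmin : ∀ j, j < N → pvHex6 j ∈ pvLowered palette additional := by
      intro j hj
      have := Nat.find_min hex hj
      push_neg at this
      exact this (by omega)
    have hA : get_nonpalette_color palette true additional =
        pvLoopAsc (pvSetA palette additional) 0 16777216 := rfl
    have hB : get_nonpalette_color_alt palette true additional =
        (if pvWalkUp (PySem.List.sorted (PySem.Set.ofList (pvVals palette additional)) (fun x => x) false) 0 ≤ 16777215
         then pvHex6 (pvWalkUp (PySem.List.sorted (PySem.Set.ofList (pvVals palette additional)) (fun x => x) false) 0)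
         else "") := rfl
    rw [hA, hB]
    have hwalk : pvWalkUp (PySem.List.sorted (PySem.Set.ofList (pvVals palette additional)) (fun x => x) false) 0 = N := by
      refine pvWalkUp_spec _ 0 N (PySem.List.sorted_ofList_pairwise_lt _) (Nat.zero_le _) ?_ ?_
      · intro hmem
        exact hNfree ((pvMem_vals palette additional N hNlt).mp
          ((PySem.Set.mem_ofList _ _).mp ((PySem.List.mem_sorted _ _ _ _).mp hmem)))
      · intro j _ hj
        exact (PySem.List.mem_sorted _ _ _ _).mpr ((PySem.Set.mem_ofList _ _).mpr
          ((pvMem_vals palette additional j (by omega)).mpr (hmin j hj)))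
    rw [hwalk, if_pos (by omega)]
    refine pvLoopAsc_spec _ 16777216 0 N (Nat.zero_le _) (by omega) ?_ ?_
    · exact (pvContainsA_false palette additional _).mpr hNfree
    · intro j _ hj
      exact (pvContainsA palette additional _).mpr (hmin j hj)
  | false =>
    -- N = the greatest free color index
    have hex : ∃ k, k < 16777216 ∧ pvHex6 (16777215 - k) ∉ pvLowered palette additional := by
      refine ⟨16777215 - j0, by omega, ?_⟩
      have : 16777215 - (16777215 - j0) = j0 := by omega
      rw [this]; exact hf0
    set M := Nat.find hex with hMdef
    obtain ⟨hMlt, hMfree⟩ := Nat.find_spec hex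
    set N := 16777215 - M with hNdef
    have hNle : N ≤ 16777215 := by omega
    have hNfree : pvHex6 N ∉ pvLowered palette additional := hMfree
    have hmax : ∀ j, N < j → j ≤ 16777215 → pvHex6 j ∈ pvLowered palette additional := by
      intro j hj1 hj2
      have hk : 16777215 - j < M := by omega
      have := Nat.find_min hex hk
      push_neg at this
      have hj : 16777215 - (16777215 - j) = j := by omega
      have h2 := this (by omega)
      rw [hj] at h2
      exact h2
    have hA : get_nonpalette_color palette false additional =
        pvLoopDesc (pvSetA palette additional) 16777215 16777216 := rfl
    have hB : get_nonpalette_color_alt palette false additional =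
        (if (0 : Int) ≤ pvWalkDown (PySem.List.sorted (PySem.Set.ofList (pvVals palette additional)) (fun x => x) true) 16777215
         then pvHex6 ((pvWalkDown (PySem.List.sorted (PySem.Set.ofList (pvVals palette additional)) (fun x => x) true) 16777215).toNat)
         else "") := rfl
    rw [hA, hB]
    have hwalk : pvWalkDown (PySem.List.sorted (PySem.Set.ofList (pvVals palette additional)) (fun x => x) true) 16777215 = (N : Int) := by
      refine pvWalkDown_spec _ _ N (pvSortedDesc_pairwise _) (by exact_mod_cast by omega) ?_ ?_
      · intro hmem
        exact hNfree ((pvMem_vals palette additional N (by omega)).mp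
          ((PySem.Set.mem_ofList _ _).mp ((PySem.List.mem_sorted _ _ _ _).mp hmem)))
      · intro j hj1 hj2
        have hj : j ≤ 16777215 := by exact_mod_cast by omega
        exact (PySem.List.mem_sorted _ _ _ _).mpr ((PySem.Set.mem_ofList _ _).mpr
          ((pvMem_vals palette additional j (by omega)).mpr (hmax j hj2 hj)))
    rw [hwalk, if_pos (by positivity)]
    rw [Int.toNat_natCast]
    refine pvLoopDesc_spec _ 16777216 16777215 N hNle (by omega) ?_ ?_
    · exact (pvContainsA_false palette additional _).mpr hNfree
    · intro j hj1 hj2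
      exact (pvContainsA palette additional _).mpr (hmax j hj1 hj2)
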